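-- pv_equiv track=rewrite | github.com/asyahrilcontentagent-dotcom/seriva | core/orchestrator.py | _parse_existing_facts
-- ===== SOURCE A (Python) =====
-- def _parse_existing_facts(summary: str) -> dict:
--     """Ekstrak fakta user sederhana dari summary lama (kalau ada).
--
--     Mengharapkan format:
--     [FAKTA_USER]
--     - Nama: ...
--     - Pekerjaan: ...
--     - Kota: ...
--     """
--
--     facts = {"nama": None, "pekerjaan": None, "kota": None}
--     if "[FAKTA_USER]" not in summary:
--         return facts
--
--     for line in summary.splitlines():
--         line = line.strip()
--         if line.startswith("- Nama:"):
--             facts["nama"] = line.split(":", 1)[1].strip() or None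
--         elif line.startswith("- Pekerjaan:"):
--             facts["pekerjaan"] = line.split(":", 1)[1].strip() or None
--         elif line.startswith("- Kota:"):
--             facts["kota"] = line.split(":", 1)[1].strip() or None
--     return facts
-- ===== SOURCE B (Python) =====
-- def _parse_existing_facts(summary: str) -> dict:
--     facts = {"nama": None, "pekerjaan": None, "kota": None}
--     if "[FAKTA_USER]" not in summary:
--         return facts
--     lines = [line.strip() for line in summary.splitlines()]
--     for key, prefix in (("nama", "- Nama:"), ("pekerjaan", "- Pekerjaan:"), ("kota", "- Kota:")):
--         values = [line.split(":", 1)[1].strip() for line in lines if line.startswith(prefix)]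
--         if values:
--             facts[key] = values[-1] or None
--     return facts
-- ===== Notes on version B (the rewrite author's own statement) =====
-- stated objective: alternative
-- what changed: A makes one pass over the lines with an if/elif prefix dispatch mutating the dict per line; B instead strips the lines once and, for each of the three keys, collects all matching lines with a filtered comprehension and keeps the last value (last-wins reproduced by values[-1]).
import Mathlib
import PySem

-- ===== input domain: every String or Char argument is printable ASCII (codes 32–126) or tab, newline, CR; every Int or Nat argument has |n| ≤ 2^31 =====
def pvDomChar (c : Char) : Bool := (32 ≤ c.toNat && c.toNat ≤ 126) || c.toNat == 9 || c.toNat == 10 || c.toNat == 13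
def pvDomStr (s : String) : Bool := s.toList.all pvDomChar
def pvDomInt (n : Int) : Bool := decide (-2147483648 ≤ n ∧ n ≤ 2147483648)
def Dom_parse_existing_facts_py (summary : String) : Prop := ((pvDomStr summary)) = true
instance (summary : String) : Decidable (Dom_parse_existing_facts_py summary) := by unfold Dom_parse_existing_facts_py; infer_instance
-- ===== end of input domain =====

-- B replaces A's single-pass per-line elif dispatch by three per-key scans (filter matching
-- lines, take the last value) — objective: idiomatic/alternative, not faster.

-- Both Pythons contain the expression `line.split(":", 1)[1].strip()` verbatim; this helper is
-- that expression.  Python's `[1]` would raise IndexError on a line without ':', but both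
-- programs evaluate it only on lines starting with a prefix that ends in ':', so the `.getD`
-- defaults below are unreachable and the port is exact.
def pvSplitVal (line : String) : String :=
  PySem.Str.strip (PySem.List.pyGetD ((PySem.Str.splitMax? line ":" 1).getD []) 1 "")

-- `v or None` for a string v
def pvOrNone (v : String) : Option String := if v = "" then none else some v

-- ===== PORT A =====
def parse_existing_facts_py (summary : String) : List (String × Option String) :=
  let facts : PySem.Dict String (Option String) :=
    (((PySem.Dict.empty : PySem.Dict String (Option String)).insert "nama" none).insert
        "pekerjaan" none).insert "kota" none
  if PySem.Str.isIn "[FAKTA_USER]" summary = false then facts.items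
  else
    ((PySem.Str.splitlines summary).foldl (fun facts rawline =>
        let line := PySem.Str.strip rawline
        if PySem.Str.startswith line "- Nama:" then
          facts.insert "nama" (pvOrNone (pvSplitVal line))
        else if PySem.Str.startswith line "- Pekerjaan:" then
          facts.insert "pekerjaan" (pvOrNone (pvSplitVal line))
        else if PySem.Str.startswith line "- Kota:" then
          facts.insert "kota" (pvOrNone (pvSplitVal line))
        else facts) facts).items

-- ===== PORT B =====
def parse_existing_facts_py_alt (summary : String) : List (String × Option String) :=
  let facts : PySem.Dict String (Option String) :=
    (((PySem.Dict.empty : PySem.Dict String (Option String)).insert "nama" none).insert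
        "pekerjaan" none).insert "kota" none
  if PySem.Str.isIn "[FAKTA_USER]" summary = false then facts.items
  else
    let lines := (PySem.Str.splitlines summary).map PySem.Str.strip
    (([("nama", "- Nama:"), ("pekerjaan", "- Pekerjaan:"), ("kota", "- Kota:")] :
        List (String × String)).foldl (fun facts kp =>
        let values := (lines.filter (fun line => PySem.Str.startswith line kp.2)).map pvSplitVal
        match values.getLast? with          -- `if values: facts[key] = values[-1] or None`
        | some v => facts.insert kp.1 (pvOrNone v)
        | none => facts) facts).items

-- ===== PRECONDITION & SPEC =====
def Spec_parse_existing_facts_py (summary : String) (out : List (String × Option String)) : Prop := out = parse_existing_facts_py_alt summary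
instance (summary : String) (out : List (String × Option String)) : Decidable (Spec_parse_existing_facts_py summary out) := by unfold Spec_parse_existing_facts_py; infer_instance

-- ===== CLAIM (what is proved, stated in full; the proofs are below) =====
def Claim_equal_parse_existing_facts_py : Prop := ∀ (summary : String), Dom_parse_existing_facts_py summary → Spec_parse_existing_facts_py summary (parse_existing_facts_py summary)

-- ===== LEMMAS AND PROOFS =====

-- the common shape of both programs' state: the three-key dict
def pvD (a b c : Option String) : PySem.Dict String (Option String) :=
  ⟨[("nama", a), ("pekerjaan", b), ("kota", c)]⟩

-- "last matching line wins, else keep x", as A's left fold computes it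
def pvUpd (p : String) (x : Option String) (ls : List String) : Option String :=
  ls.foldl (fun acc l => if PySem.Str.startswith l p then pvOrNone (pvSplitVal l) else acc) x

lemma pvD_init :
    (((PySem.Dict.empty : PySem.Dict String (Option String)).insert "nama" none).insert
        "pekerjaan" none).insert "kota" none = pvD none none none := by
  simp [PySem.Dict.insert, PySem.Dict.empty, pvD]

lemma pvIns1 (a b c v : Option String) : (pvD a b c).insert "nama" v = pvD v b c := by
  simp [PySem.Dict.insert, pvD]

lemma pvIns2 (a b c v : Option String) : (pvD a b c).insert "pekerjaan" v = pvD a v c := by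
  simp [PySem.Dict.insert, pvD]

lemma pvIns3 (a b c v : Option String) : (pvD a b c).insert "kota" v = pvD a b v := by
  simp [PySem.Dict.insert, pvD]

-- the three prefixes are mutually exclusive
lemma pvExcl12 (l : String) (h : PySem.Str.startswith l "- Nama:" = true) :
    PySem.Str.startswith l "- Pekerjaan:" = false := by
  simp only [PySem.Str.startswith_eq] at h ⊢
  rcases (PySem.Chars.startswith_iff _ _).mp h with ⟨t, ht⟩
  rw [← ht]; simp [PySem.Chars.startswith, List.isPrefixOf]

lemma pvExcl13 (l : String) (h : PySem.Str.startswith l "- Nama:" = true) :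
    PySem.Str.startswith l "- Kota:" = false := by
  simp only [PySem.Str.startswith_eq] at h ⊢
  rcases (PySem.Chars.startswith_iff _ _).mp h with ⟨t, ht⟩
  rw [← ht]; simp [PySem.Chars.startswith, List.isPrefixOf]

lemma pvExcl23 (l : String) (h : PySem.Str.startswith l "- Pekerjaan:" = true) :
    PySem.Str.startswith l "- Kota:" = false := by
  simp only [PySem.Str.startswith_eq] at h ⊢
  rcases (PySem.Chars.startswith_iff _ _).mp h with ⟨t, ht⟩
  rw [← ht]; simp [PySem.Chars.startswith, List.isPrefixOf]

-- one step of A's loop, read off per key (uses the mutual exclusivity of the prefixes)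
lemma pvStepA (l : String) (a b c : Option String) :
    (if PySem.Str.startswith l "- Nama:" then
        (pvD a b c).insert "nama" (pvOrNone (pvSplitVal l))
      else if PySem.Str.startswith l "- Pekerjaan:" then
        (pvD a b c).insert "pekerjaan" (pvOrNone (pvSplitVal l))
      else if PySem.Str.startswith l "- Kota:" then
        (pvD a b c).insert "kota" (pvOrNone (pvSplitVal l))
      else pvD a b c)
    = pvD (if PySem.Str.startswith l "- Nama:" then pvOrNone (pvSplitVal l) else a)
        (if PySem.Str.startswith l "- Pekerjaan:" then pvOrNone (pvSplitVal l) else b)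
        (if PySem.Str.startswith l "- Kota:" then pvOrNone (pvSplitVal l) else c) := by
  cases h1 : PySem.Str.startswith l "- Nama:" with
  | true =>
    have h2 := pvExcl12 l h1
    have h3 := pvExcl13 l h1
    simp only [h2, h3, Bool.false_eq_true, if_true, if_false, pvIns1]
  | false =>
    cases h2 : PySem.Str.startswith l "- Pekerjaan:" with
    | true =>
      have h3 := pvExcl23 l h2
      simp only [h3, Bool.false_eq_true, if_true, if_false, pvIns2]
    | false =>
      cases h3 : PySem.Str.startswith l "- Kota:" with
      | true => simp only [Bool.false_eq_true, if_true, if_false, pvIns3]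
      | false => simp only [Bool.false_eq_true, if_false]

-- A's fold over the (stripped) lines, characterised per key
lemma pvFoldA (ls : List String) : ∀ (a b c : Option String),
    ls.foldl (fun facts line =>
        if PySem.Str.startswith line "- Nama:" then
          facts.insert "nama" (pvOrNone (pvSplitVal line))
        else if PySem.Str.startswith line "- Pekerjaan:" then
          facts.insert "pekerjaan" (pvOrNone (pvSplitVal line))
        else if PySem.Str.startswith line "- Kota:" then
          facts.insert "kota" (pvOrNone (pvSplitVal line))
        else facts) (pvD a b c)
      = pvD (pvUpd "- Nama:" a ls) (pvUpd "- Pekerjaan:" b ls) (pvUpd "- Kota:" c ls) := by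
  induction ls with
  | nil => intro a b c; simp [pvUpd]
  | cons l ls ih =>
    intro a b c
    rw [List.foldl_cons]
    show ls.foldl _ (if PySem.Str.startswith l "- Nama:" then _ else _) = _
    rw [pvStepA, ih]
    rfl

-- last-or-default, the shape shared by pvUpd_eq and pvLast_foldl
def pvLastOr {β γ : Type} (g : β → γ) (x : γ) (o : Option β) : γ :=
  match o with | some v => g v | none => x

-- the last element of the filtered-and-mapped list IS the left fold's final accumulator
lemma pvLast_foldl {α β γ : Type} (q : α → Bool) (f : α → β) (g : β → γ) :
    ∀ (ls : List α) (x : γ),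
      pvLastOr g x ((ls.filter q).map f).getLast?
        = ls.foldl (fun acc l => if q l then g (f l) else acc) x := by
  intro ls
  induction ls with
  | nil => intro x; simp [pvLastOr]
  | cons l ls ih =>
    intro x
    by_cases h : q l
    · rw [List.foldl_cons]
      rw [if_pos h, ← ih (g (f l))]
      simp only [List.filter_cons, h, if_pos, List.map_cons]
      cases hm : ((ls.filter q).map f).getLast? with
      | none =>
        have : ls.filter q = [] := by
          cases hf : ls.filter q with
          | nil => rfl
          | cons y ys => rw [hf] at hm; simp at hm
        simp [this, pvLastOr]
      | some v => simp [pvLastOr, List.getLast?_cons, hm]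
    · rw [List.foldl_cons, if_neg h, ← ih x]
      simp [h]

-- pvUpd from none, written as B writes it: last matching value or nothing
lemma pvUpd_eq (p : String) (L : List String) :
    pvUpd p none L
      = pvLastOr pvOrNone none
          ((L.filter (fun l => PySem.Str.startswith l p)).map pvSplitVal).getLast? := by
  unfold pvUpd
  exact (pvLast_foldl (fun l => PySem.Str.startswith l p) pvSplitVal pvOrNone L none).symm

-- B's fold over the three (key, prefix) pairs, characterised per key
lemma pvFoldB (L : List String) :
    (([("nama", "- Nama:"), ("pekerjaan", "- Pekerjaan:"), ("kota", "- Kota:")] :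
        List (String × String)).foldl (fun facts kp =>
        match ((L.filter (fun line => PySem.Str.startswith line kp.2)).map pvSplitVal).getLast? with
        | some v => facts.insert kp.1 (pvOrNone v)
        | none => facts) (pvD none none none))
      = pvD (pvUpd "- Nama:" none L) (pvUpd "- Pekerjaan:" none L) (pvUpd "- Kota:" none L) := by
  rw [pvUpd_eq, pvUpd_eq, pvUpd_eq]
  simp only [List.foldl_cons, List.foldl_nil]
  cases h1 : ((L.filter (fun l => PySem.Str.startswith l "- Nama:")).map pvSplitVal).getLast? <;>
    cases h2 : ((L.filter (fun l => PySem.Str.startswith l "- Pekerjaan:")).map pvSplitVal).getLast? <;>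
      cases h3 : ((L.filter (fun l => PySem.Str.startswith l "- Kota:")).map pvSplitVal).getLast? <;>
        simp only [pvLastOr, pvIns1, pvIns2, pvIns3]

-- ===== VERDICT (by name: the statement is the Claim_ definition above) =====
theorem parse_existing_facts_py_spec : Claim_equal_parse_existing_facts_py := by
  intro summary _
  unfold Spec_parse_existing_facts_py parse_existing_facts_py parse_existing_facts_py_alt
  cases hin : PySem.Str.isIn "[FAKTA_USER]" summary with
  | false => rfl
  | true =>
    simp only [Bool.true_eq_false, if_false, pvD_init]
    have h := pvFoldA ((PySem.Str.splitlines summary).map PySem.Str.strip) none none none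
    simp only [List.foldl_map] at h
    rw [h, pvFoldB]
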